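-- pv_equiv track=rewrite | github.com/amazon-science/NeoQA | dataset-generation/data_gen/util/packing_tools.py | is_sufficient_evidence
-- ===== SOURCE A (Python) =====
-- from typing import List, Iterable, Dict, Set, Optional, Tuple
--
-- def is_sufficient_evidence(evidence_ids: List[str], selection: List[Dict]):
--     all_selected_evidence: Set[str] = {
--         item for article in selection for item in article['used_items'].keys()
--     }
--     if set(evidence_ids) == set(evidence_ids) & all_selected_evidence:
--         return True
--     else:
--         return False
-- ===== SOURCE B (Python) =====
-- def is_sufficient_evidence(evidence_ids, selection):
--     return all(
--         any(eid in article['used_items'] for article in selection)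
--         for eid in evidence_ids
--     )
-- ===== Notes on version B (the rewrite author's own statement) =====
-- stated objective: simpler
-- what changed: Instead of materializing the union set of all used_items keys and testing set equality against its intersection with evidence_ids, B does a direct all/any scan: for each evidence id it checks membership in some article's used_items, building no intermediate sets.
import Mathlib
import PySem

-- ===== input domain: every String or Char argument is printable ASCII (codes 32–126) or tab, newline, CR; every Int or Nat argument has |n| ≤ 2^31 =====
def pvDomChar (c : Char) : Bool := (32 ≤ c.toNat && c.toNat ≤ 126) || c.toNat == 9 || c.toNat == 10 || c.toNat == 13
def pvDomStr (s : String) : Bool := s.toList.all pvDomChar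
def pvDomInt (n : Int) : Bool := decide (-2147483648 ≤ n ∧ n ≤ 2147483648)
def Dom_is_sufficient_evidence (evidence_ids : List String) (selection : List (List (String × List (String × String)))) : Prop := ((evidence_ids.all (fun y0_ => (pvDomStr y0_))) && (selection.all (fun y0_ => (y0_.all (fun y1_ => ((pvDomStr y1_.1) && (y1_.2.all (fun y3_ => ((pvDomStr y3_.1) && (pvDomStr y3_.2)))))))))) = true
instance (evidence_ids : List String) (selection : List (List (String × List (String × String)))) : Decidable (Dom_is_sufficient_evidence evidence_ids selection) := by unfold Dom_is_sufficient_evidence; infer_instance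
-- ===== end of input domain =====

-- B replaces A's build-a-union-set-then-set-compare with a direct all/any membership scan; objective: simpler.

-- ===== PORT A =====
-- article['used_items'] (KeyError when absent → [] here, excluded by Pre_)
def pvUsedItemsA (article : List (String × List (String × String))) : List (String × String) :=
  match PySem.Dict.get? (PySem.Dict.mk article) "used_items" with
  | some d => d
  | none => []

def is_sufficient_evidence (evidence_ids : List String) (selection : List (List (String × List (String × String)))) : Bool :=
  let all_selected_evidence : PySem.Set String :=
    PySem.Set.ofList (selection.flatMap (fun article => (PySem.Dict.mk (pvUsedItemsA article)).keys))
  if PySem.Set.equal (PySem.Set.ofList evidence_ids)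
       (PySem.Set.inter (PySem.Set.ofList evidence_ids) all_selected_evidence)
  then true else false

-- ===== PORT B =====
def is_sufficient_evidence_alt (evidence_ids : List String) (selection : List (List (String × List (String × String)))) : Bool :=
  evidence_ids.all (fun eid =>
    selection.any (fun article =>
      match PySem.Dict.get? (PySem.Dict.mk article) "used_items" with
      | some d => PySem.Dict.contains (PySem.Dict.mk d) eid
      | none => false))   -- KeyError in Python; excluded by Pre_

-- ===== PRECONDITION & SPEC =====
-- Pre_ excludes exactly the inputs where A raises KeyError: some article has no 'used_items' key.
def Pre_is_sufficient_evidence (evidence_ids : List String) (selection : List (List (String × List (String × String)))) : Prop :=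
  ∀ article ∈ selection, "used_items" ∈ article.map Prod.fst
instance (evidence_ids : List String) (selection : List (List (String × List (String × String)))) : Decidable (Pre_is_sufficient_evidence evidence_ids selection) := by unfold Pre_is_sufficient_evidence; infer_instance

def pvWitness_is_sufficient_evidence : List String × (List (List (String × List (String × String)))) :=
  (["e1"], [[("used_items", [("e1", "x"), ("e2", "y")])]])

def Spec_is_sufficient_evidence (evidence_ids : List String) (selection : List (List (String × List (String × String)))) (out : Bool) : Prop := out = is_sufficient_evidence_alt evidence_ids selection
instance (evidence_ids : List String) (selection : List (List (String × List (String × String)))) (out : Bool) : Decidable (Spec_is_sufficient_evidence evidence_ids selection out) := by unfold Spec_is_sufficient_evidence; infer_instance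

-- ===== CLAIM (what is proved, stated in full; the proofs are below) =====
def Claim_equal_is_sufficient_evidence : Prop := ∀ (evidence_ids : List String) (selection : List (List (String × List (String × String)))), Dom_is_sufficient_evidence evidence_ids selection → Pre_is_sufficient_evidence evidence_ids selection → Spec_is_sufficient_evidence evidence_ids selection (is_sufficient_evidence evidence_ids selection)

-- ===== LEMMAS AND PROOFS =====

theorem pv_keys_mem (article : List (String × List (String × String))) (x : String) :
    x ∈ (PySem.Dict.mk (pvUsedItemsA article)).keys ↔
      (match PySem.Dict.get? (PySem.Dict.mk article) "used_items" with
       | some d => PySem.Dict.contains (PySem.Dict.mk d) x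
       | none => false) = true := by
  unfold pvUsedItemsA
  cases PySem.Dict.get? (PySem.Dict.mk article) "used_items" with
  | none => simp [PySem.Dict.keys]
  | some d => simp [PySem.Dict.keys]

theorem pv_ports_agree (evidence_ids : List String) (selection : List (List (String × List (String × String)))) :
    is_sufficient_evidence evidence_ids selection = is_sufficient_evidence_alt evidence_ids selection := by
  simp only [is_sufficient_evidence, is_sufficient_evidence_alt]
  rw [Bool.eq_iff_iff]
  simp only [Bool.if_true_left, Bool.or_eq_true, decide_eq_true_eq, Bool.false_eq_true, or_false,
    PySem.Set.equal_iff, PySem.Set.mem_inter, PySem.Set.mem_ofList, List.mem_flatMap,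
    List.all_eq_true, List.any_eq_true, pv_keys_mem]
  constructor
  · intro h eid he
    obtain ⟨a, ha, hp⟩ := ((h eid).mp he).2
    exact ⟨a, ha, hp⟩
  · intro h x
    constructor
    · intro hx
      obtain ⟨a, ha, hp⟩ := h x hx
      exact ⟨hx, a, ha, hp⟩
    · exact fun hx => hx.1

-- ===== VERDICT (by name: the statement is the Claim_ definition above) =====
theorem is_sufficient_evidence_spec : Claim_equal_is_sufficient_evidence := by
  intro e s _ _
  unfold Spec_is_sufficient_evidence
  exact pv_ports_agree e s
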